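-- pv_equiv track=rewrite | github.com/kadas-albireo/kadas-ovl-plugin | copexreader/COPExObject2MSSConverter.py | _merge_id
-- ===== SOURCE A (Python) =====
-- def _merge_id(ids):
--     """
--     Merges an array symbols_ids to one symbol id. Based on the first id all "*" values will be replaced by the next
--     ids.
--     @param ids array with symbols ids. The important id must be the first
--     @return a single symbol id
--     """
--     sym_id = "***************"
--     for id1 in ids:
--         sym_id_temp = ""
--         if len(id1) < len(sym_id):
--             continue
--
--         for i in range(0, len(sym_id)):
--             if sym_id[i] == "*":
--                 sym_id_temp += id1[i]
--             else:
--                 sym_id_temp += sym_id[i]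
--         sym_id = sym_id_temp
--
--     return sym_id
-- ===== SOURCE B (Python) =====
-- def _merge_id(ids):
--     """Column-major rewrite: for each of the 15 positions take the first
--     non-'*' character among the sufficiently long ids, defaulting to '*'."""
--     return "".join(
--         next((s[i] for s in ids if len(s) >= 15 and s[i] != "*"), "*")
--         for i in range(15)
--     )
-- ===== Notes on version B (the rewrite author's own statement) =====
-- stated objective: idiomatic
-- what changed: Transposed the loop nesting: instead of A's row-major fold that rebuilds a mutable 15-char merge string per id, B goes column-major, computing each of the 15 output positions independently as the first non-'*' character among the ids of length >= 15 (default '*').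
import Mathlib
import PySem

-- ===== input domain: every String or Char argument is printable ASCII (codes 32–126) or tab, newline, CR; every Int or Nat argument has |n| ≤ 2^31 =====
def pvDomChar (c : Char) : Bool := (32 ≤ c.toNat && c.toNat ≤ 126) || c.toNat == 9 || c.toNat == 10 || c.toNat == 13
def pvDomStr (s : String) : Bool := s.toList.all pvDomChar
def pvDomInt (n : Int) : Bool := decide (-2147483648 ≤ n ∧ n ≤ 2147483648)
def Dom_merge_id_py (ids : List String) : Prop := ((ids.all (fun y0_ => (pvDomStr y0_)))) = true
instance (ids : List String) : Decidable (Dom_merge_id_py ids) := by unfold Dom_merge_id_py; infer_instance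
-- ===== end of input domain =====

-- B rewrites A column-major: for each of the 15 positions, the first non-'*'
-- character among the sufficiently long ids (objective: more idiomatic, no mutable merge state).

-- ===== PORT A =====
-- inner loop of A: builds sym_id_temp character by character; the index i ranges over
-- 0 ≤ i < len(sym_id) so both subscripts are always in range and pyGetD's default is never used (exact)
def mergeIdStep (sym : List Char) (id1 : List Char) : List Char :=
  if (id1.length : Int) < (sym.length : Int) then sym
  else
    (PySem.List.pyRange 0 (sym.length : Int) 1).foldl
      (fun acc i =>
        if PySem.List.pyGetD sym i '*' = '*'
        then acc ++ [PySem.List.pyGetD id1 i '*']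
        else acc ++ [PySem.List.pyGetD sym i '*']) []

def merge_id_py (ids : List String) : String :=
  String.ofList
    (ids.foldl (fun sym id1 => mergeIdStep sym id1.toList) ("***************".toList))

-- ===== PORT B =====
-- next((s[i] for s in ids if len(s) >= 15 and s[i] != "*"), "*"): s[i] is only read
-- when len(s) ≥ 15 > i, hence always in range and pyGetD's default is never used (exact)
def pickCol : List String → Int → Char
  | [], _ => '*'
  | s :: rest, i =>
    if 15 ≤ (s.toList.length : Int) ∧ ¬ PySem.List.pyGetD s.toList i '*' = '*'
    then PySem.List.pyGetD s.toList i '*'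
    else pickCol rest i

def merge_id_py_alt (ids : List String) : String :=
  String.ofList ((PySem.List.pyRange 0 15 1).map (fun i => pickCol ids i))

-- ===== PRECONDITION & SPEC =====
def Spec_merge_id_py (ids : List String) (out : String) : Prop := out = merge_id_py_alt ids
instance (ids : List String) (out : String) : Decidable (Spec_merge_id_py ids out) := by unfold Spec_merge_id_py; infer_instance

-- ===== CLAIM (what is proved, stated in full; the proofs are below) =====
def Claim_equal_merge_id_py : Prop := ∀ (ids : List String), Dom_merge_id_py ids → Spec_merge_id_py ids (merge_id_py ids)

-- ===== LEMMAS AND PROOFS =====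

-- Nat-index version of B's scan, used only in the proofs
def pickColN : List String → Nat → Char
  | [], _ => '*'
  | s :: rest, k =>
    if 15 ≤ s.toList.length ∧ ¬ s.toList.getD k '*' = '*'
    then s.toList.getD k '*'
    else pickColN rest k

lemma pickColN_cons (s : String) (rest : List String) (k : Nat) :
    pickColN (s :: rest) k
      = if 15 ≤ s.toList.length ∧ ¬ s.toList.getD k '*' = '*'
        then s.toList.getD k '*' else pickColN rest k := rfl

lemma pickCol_natCast (ids : List String) (k : Nat) :
    pickCol ids (k : Int) = pickColN ids k := by
  induction ids with
  | nil => rfl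
  | cons s rest ih =>
    unfold pickCol pickColN
    rw [PySem.List.pyGetD_natCast, ih]
    by_cases hc : 15 ≤ s.toList.length ∧ ¬ s.toList.getD k '*' = '*'
    · rw [if_pos ⟨by exact_mod_cast hc.1, hc.2⟩, if_pos hc]
    · rw [if_neg (fun h => hc ⟨by exact_mod_cast h.1, h.2⟩), if_neg hc]

lemma mergeIdStep_eq (sym s : List Char) :
    mergeIdStep sym s =
      if s.length < sym.length then sym
      else (List.range sym.length).map
        (fun k => if sym.getD k '*' = '*' then s.getD k '*' else sym.getD k '*') := by
  unfold mergeIdStep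
  rcases Nat.lt_or_ge s.length sym.length with h | h
  · simp [h]
  · rw [if_neg (by exact_mod_cast not_lt.mpr (by exact_mod_cast h)),
        if_neg (by omega)]
    have hfun : (fun (acc : List Char) (i : Int) =>
        if PySem.List.pyGetD sym i '*' = '*'
        then acc ++ [PySem.List.pyGetD s i '*']
        else acc ++ [PySem.List.pyGetD sym i '*'])
      = (fun acc i => acc ++ [if PySem.List.pyGetD sym i '*' = '*'
          then PySem.List.pyGetD s i '*' else PySem.List.pyGetD sym i '*']) := by
      funext acc i; split <;> rfl
    rw [hfun, PySem.List.foldl_append_singleton_eq_map]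
    rw [show ((sym.length : Int)) = ((sym.length : Nat) : Int) from rfl,
        PySem.List.pyRange_zero]
    simp [List.map_map, Function.comp, PySem.List.pyGetD_natCast]

lemma mergeIdStep_length (sym s : List Char) :
    (mergeIdStep sym s).length = sym.length := by
  rw [mergeIdStep_eq]; split <;> simp

lemma fold_eq (ids : List String) (sym : List Char) (h : sym.length = 15) :
    ids.foldl (fun l s => mergeIdStep l s.toList) sym
      = (List.range 15).map
          (fun k => if sym.getD k '*' = '*' then pickColN ids k else sym.getD k '*') := by
  induction ids generalizing sym with
  | nil =>
    simp only [List.foldl_nil, pickColN]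
    apply List.ext_getElem
    · simp [h]
    · intro i h1 h2
      simp only [List.getElem_map, List.getElem_range]
      have : sym.getD i '*' = sym[i] := List.getD_eq_getElem _ _ h1
      split <;> simp_all
  | cons s rest ih =>
    simp only [List.foldl_cons]
    rw [ih (mergeIdStep sym s.toList) (by rw [mergeIdStep_length, h])]
    apply List.map_congr_left
    intro k hk
    have hk15 : k < 15 := List.mem_range.mp hk
    by_cases hlen : s.toList.length < 15
    · have hstep : mergeIdStep sym s.toList = sym := by
        rw [mergeIdStep_eq, if_pos (by omega)]
      rw [hstep]
      have hpk : pickColN (s :: rest) k = pickColN rest k := by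
        rw [pickColN_cons, if_neg (fun h2 => absurd h2.1 (by omega))]
      rw [hpk]
    · have hstep : (mergeIdStep sym s.toList).getD k '*'
          = (if sym.getD k '*' = '*' then s.toList.getD k '*' else sym.getD k '*') := by
        rw [mergeIdStep_eq, if_neg (by omega), PySem.List.getD_map_range _ _ _ _ (by omega)]
      rw [hstep]
      have hge : 15 ≤ s.toList.length := Nat.le_of_not_lt hlen
      by_cases hstar : sym.getD k '*' = '*'
      · rw [hstar]; simp only [if_true]
        rw [pickColN_cons]
        by_cases hs : s.toList.getD k '*' = '*'
        · rw [if_pos hs, if_neg (fun h2 => h2.2 hs)]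
        · rw [if_neg hs, if_pos ⟨hge, hs⟩]
      · simp only [if_neg hstar]

lemma star15_toList : ("***************" : String).toList = List.replicate 15 '*' := by decide

theorem merge_id_py_spec_aux (ids : List String) :
    merge_id_py ids = merge_id_py_alt ids := by
  unfold merge_id_py merge_id_py_alt
  rw [star15_toList, fold_eq ids _ (by simp)]
  rw [show ((15 : Int)) = ((15 : Nat) : Int) from rfl, PySem.List.pyRange_zero]
  simp only [Int.toNat_natCast, List.map_map]
  congr 1
  apply List.map_congr_left
  intro k hk
  have hk15 : k < 15 := List.mem_range.mp hk
  rw [List.getD_eq_getElem _ _ (by simpa using hk15),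
      List.getElem_replicate, if_pos rfl]
  exact (pickCol_natCast ids k).symm

-- ===== VERDICT (by name: the statement is the Claim_ definition above) =====
theorem merge_id_py_spec : Claim_equal_merge_id_py := by
  intro ids _
  unfold Spec_merge_id_py
  exact merge_id_py_spec_aux ids
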